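-- pv_equiv track=rewrite | github.com/Onselius/adventofcode2 | python/2023/day16/day16.py | part2
-- ===== SOURCE A (Python) =====
-- from collections import deque
--
-- def traverse(grid, start):
--     seen = set()
--     queue = deque()
--     queue.append(start)
--     while queue:
--         position = queue.popleft()
--         if position[:2] not in grid:
--             continue
--         seen.add(position)
--         next_pos = get_next(position, grid)
--         queue.extend([p for p in next_pos if p not in seen])
--     return len({(r, c) for (r, c, _, _) in seen})
--
-- def get_next(pos, grid):
--     r, c, dr, dc = pos
--     val = grid[(r, c)]
--     a = []
--     if val == "." or (val == "-" and dc != 0) or (val == "|" and dr != 0):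
--         r += dr
--         c += dc
--         a.append((r, c, dr, dc))
--     elif val == "/":
--         dr, dc = -dc, -dr
--         r += dr
--         c += dc
--         a.append((r, c, dr, dc))
--     elif val == "\\":
--         dr, dc = dc, dr
--         r += dr
--         c += dc
--         a.append((r, c, dr, dc))
--     elif val == "|":
--         for dr_new, dc_new in [(1, 0), (-1, 0)]:
--             a.append((r + dr_new, c + dc_new, dr_new, dc_new))
--     else:
--         for dr_new, dc_new in [(0, 1), (0, -1)]:
--             a.append((r + dr_new, c + dc_new, dr_new, dc_new))
--
--     return a
--
-- def part2(grid: dict):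
--     maxY: int = max(y for y, x in grid.keys())
--     maxX: int = max(x for y, x in grid.keys())
--     minY: int = min(y for y, x in grid.keys())
--     minX: int = min(x for y, x in grid.keys())
--     start = []
--     for r in range(maxY + 1):
--         start.append((r, minX, 0, 1))
--         start.append((r, maxX, 0, -1))
--     for c in range(maxX + +11):
--         start.append((minY, c, 1, 0))
--         start.append((maxY, c, -1, 0))
--     energy = 0
--     for s in start:
--         n = traverse(grid, s)
--         energy = max(energy, n)
--     return energy
-- ===== SOURCE B (Python) =====
-- # B: round-based saturation instead of a deque BFS — each round expands the whole
-- # seen set at once and stops at the first fixpoint (bounded by 4*len(grid) rounds).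
-- def get_next(pos, grid):
--     r, c, dr, dc = pos
--     val = grid[(r, c)]
--     a = []
--     if val == "." or (val == "-" and dc != 0) or (val == "|" and dr != 0):
--         r += dr
--         c += dc
--         a.append((r, c, dr, dc))
--     elif val == "/":
--         dr, dc = -dc, -dr
--         r += dr
--         c += dc
--         a.append((r, c, dr, dc))
--     elif val == "\\":
--         dr, dc = dc, dr
--         r += dr
--         c += dc
--         a.append((r, c, dr, dc))
--     elif val == "|":
--         for dr_new, dc_new in [(1, 0), (-1, 0)]:
--             a.append((r + dr_new, c + dc_new, dr_new, dc_new))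
--     else:
--         for dr_new, dc_new in [(0, 1), (0, -1)]:
--             a.append((r + dr_new, c + dc_new, dr_new, dc_new))
--     return a
--
-- def traverse(grid, start):
--     if start[:2] not in grid:
--         return 0
--     seen = {start}
--     for _ in range(4 * len(grid)):
--         grown = seen | {p for s in seen for p in get_next(s, grid) if p[:2] in grid}
--         if len(grown) == len(seen):
--             break
--         seen = grown
--     return len({(r, c) for (r, c, _, _) in seen})
--
-- def part2(grid: dict):
--     ys = [y for y, x in grid.keys()]
--     xs = [x for y, x in grid.keys()]
--     maxY, minY, maxX, minX = max(ys), min(ys), max(xs), min(xs)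
--     starts = []
--     for r in range(maxY + 1):
--         starts += [(r, minX, 0, 1), (r, maxX, 0, -1)]
--     for c in range(maxX + 11):
--         starts += [(minY, c, 1, 0), (maxY, c, -1, 0)]
--     energy = 0
--     for s in starts:
--         energy = max(energy, traverse(grid, s))
--     return energy
-- ===== Notes on version B (the rewrite author's own statement) =====
-- stated objective: alternative
-- what changed: traverse's deque-based BFS (pop one state, push its unseen successors) is replaced by a round-based saturation: each round expands the whole seen set through get_next at once and the loop stops at the first fixpoint, bounded by 4*len(grid) rounds; no queue is maintained.
import Mathlib
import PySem

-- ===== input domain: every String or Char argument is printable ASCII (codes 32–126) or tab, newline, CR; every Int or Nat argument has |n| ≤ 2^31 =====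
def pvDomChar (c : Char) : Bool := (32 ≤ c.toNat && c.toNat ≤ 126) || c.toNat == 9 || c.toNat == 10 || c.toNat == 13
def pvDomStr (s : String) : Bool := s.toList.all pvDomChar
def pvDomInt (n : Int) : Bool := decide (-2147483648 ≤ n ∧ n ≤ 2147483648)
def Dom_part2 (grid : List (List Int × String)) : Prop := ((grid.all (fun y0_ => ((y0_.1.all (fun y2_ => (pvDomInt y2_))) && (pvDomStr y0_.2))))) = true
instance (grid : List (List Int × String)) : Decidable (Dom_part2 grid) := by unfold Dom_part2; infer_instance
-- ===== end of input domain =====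

-- Both ports agree on the RETURN value; A mutates nothing observable.
-- B replaces A's deque-based BFS in `traverse` by a round-based saturation of the whole
-- seen set that stops at the first fixpoint (objective: alternative algorithm).

-- a beam state (r, c, dr, dc)
abbrev PvSt : Type := Int × Int × Int × Int

-- the four axis directions a beam can have
def pvD4 : List (Int × Int) := [(1, 0), (-1, 0), (0, 1), (0, -1)]

-- invariant carried by both traversals (every queue element has an axis direction);
-- needed for the termination measure of A's while-loop
def PvDirOk (x : PvSt) : Prop := x.2.2 ∈ pvD4

-- ===== PORT A =====

-- port of get_next (shared verbatim by Source A and Source B)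
def getNext (d : PySem.Dict (List Int) String) (pos : PvSt) : List PvSt :=
  match pos with
  | (r, c, dr, dc) =>
    let val := (PySem.Dict.get? d [r, c]).getD ""
    if val = "." ∨ (val = "-" ∧ dc ≠ 0) ∨ (val = "|" ∧ dr ≠ 0) then
      [(r + dr, c + dc, dr, dc)]
    else if val = "/" then
      [(r + -dc, c + -dr, -dc, -dr)]
    else if val = "\\" then
      [(r + dc, c + dr, dc, dr)]
    else if val = "|" then
      [(r + 1, c + 0, 1, 0), (r + -1, c + 0, -1, 0)]
    else
      [(r + 0, c + 1, 0, 1), (r + 0, c + -1, 0, -1)]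

theorem getNext_length_le (d : PySem.Dict (List Int) String) (pos : PvSt) :
    (getNext d pos).length ≤ 2 := by
  obtain ⟨r, c, dr, dc⟩ := pos
  simp only [getNext]
  split_ifs <;> simp

theorem dirOk_getNext (d : PySem.Dict (List Int) String) (pos : PvSt) (h : PvDirOk pos) :
    ∀ q ∈ getNext d pos, PvDirOk q := by
  intro q hq
  obtain ⟨r, c, dr, dc⟩ := pos
  simp only [getNext] at hq
  simp only [PvDirOk, pvD4, List.mem_cons] at h ⊢
  split_ifs at hq <;> simp only [List.mem_cons, List.not_mem_nil, or_false] at hq <;>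
    rcases hq with rfl | rfl <;> rcases h with h | h | h | h <;>
    simp_all

-- termination-measure helpers for A's BFS loop
def pvKeyStates (k : List Int) : List PvSt :=
  match k with
  | [r, c] => pvD4.map (fun p => (r, c, p.1, p.2))
  | _ => []

def pvUniv (d : PySem.Dict (List Int) String) : List PvSt := d.keys.flatMap pvKeyStates

def pvMeasU (d : PySem.Dict (List Int) String) (seen : List PvSt) : Nat :=
  ((pvUniv d).toFinset \ seen.toFinset).card

def pvMeasW (seen queue : List PvSt) : Nat :=
  (queue.map (fun x => if x ∈ seen then 3 else 1)).sum

theorem pv_mem_univ (d : PySem.Dict (List Int) String) (s : PvSt)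
    (hin : PySem.Dict.contains d [s.1, s.2.1] = true) (hd : PvDirOk s) : s ∈ pvUniv d := by
  have hk : [s.1, s.2.1] ∈ d.keys := (PySem.Dict.contains_iff_mem_keys d _).mp hin
  refine List.mem_flatMap.mpr ⟨[s.1, s.2.1], hk, ?_⟩
  simp only [pvKeyStates, List.mem_map]
  exact ⟨s.2.2, hd, rfl⟩

-- the while-loop of traverse: pop, skip off-grid, mark seen, push unseen successors
def bfsAux (d : PySem.Dict (List Int) String) (seen queue : List PvSt)
    (hq : ∀ x ∈ queue, PvDirOk x) : List PvSt :=
  match queue with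
  | [] => seen
  | s :: tail =>
    if hin : PySem.Dict.contains d [s.1, s.2.1] = true then
      bfsAux d (PySem.Set.add seen s)
        (tail ++ (getNext d s).filter (fun p => !(PySem.Set.contains (PySem.Set.add seen s) p)))
        (by
          intro x hx
          rcases List.mem_append.mp hx with h | h
          · exact hq x (List.mem_cons_of_mem _ h)
          · exact dirOk_getNext d s (hq s List.mem_cons_self) x (List.mem_of_mem_filter h))
    else
      bfsAux d seen tail (fun x hx => hq x (List.mem_cons_of_mem _ hx))
termination_by (pvMeasU d seen, pvMeasW seen queue)
decreasing_by
  · by_cases hmem : s ∈ seen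
    · rw [PySem.Set.add_of_mem hmem]
      apply Prod.Lex.right
      simp only [pvMeasW, List.map_append, List.sum_append, List.map_cons, List.sum_cons,
        if_pos hmem]
      have hlen : ((getNext d s).filter (fun p => !PySem.Set.contains seen p)).length ≤ 2 :=
        le_trans (List.length_filter_le _ _) (getNext_length_le d s)
      have h2 : (((getNext d s).filter (fun p => !PySem.Set.contains seen p)).map
          (fun x => if x ∈ seen then 3 else 1)).sum ≤
          (((getNext d s).filter (fun p => !PySem.Set.contains seen p)).map
            (fun x => if x ∈ seen then 3 else 1)).length • 1 := by
        apply List.sum_le_card_nsmul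
        intro y hy
        simp only [List.mem_map, List.mem_filter] at hy
        obtain ⟨p, ⟨_, hp⟩, rfl⟩ := hy
        have hns : p ∉ seen := by simpa [PySem.Set.contains_iff] using hp
        simp [hns]
      simp only [smul_eq_mul, mul_one, List.length_map] at h2
      omega
    · apply Prod.Lex.left
      rw [PySem.Set.add_of_not_mem hmem]
      unfold pvMeasU
      apply Finset.card_lt_card
      have hs_univ := pv_mem_univ d s hin (hq s List.mem_cons_self)
      have hsub : ((pvUniv d).toFinset \ (seen ++ [s]).toFinset) ⊆
          ((pvUniv d).toFinset \ seen.toFinset) := by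
        apply Finset.sdiff_subset_sdiff (Finset.Subset.refl _)
        intro x hx
        simp only [List.mem_toFinset, List.mem_append] at hx ⊢
        exact Or.inl hx
      rw [Finset.ssubset_iff_of_subset hsub]
      exact ⟨s, by simp [hs_univ, hmem], by simp⟩
  · apply Prod.Lex.right
    simp only [pvMeasW, List.map_cons, List.sum_cons]
    split_ifs <;> omega

-- port of traverse (A): BFS from start, then count distinct positions
def traverseA (d : PySem.Dict (List Int) String) (start : PvSt) (h : PvDirOk start) : Int :=
  let seen := bfsAux d [] [start] (by intro x hx; rw [List.mem_singleton] at hx; exact hx ▸ h)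
  ((PySem.Set.ofList (seen.map (fun x => (x.1, x.2.1)))).length : Int)

-- the 'for s in start: energy = max(energy, traverse(grid, s))' loop
def loopStarts (d : PySem.Dict (List Int) String) (starts : List PvSt) (energy : Int)
    (h : ∀ s ∈ starts, PvDirOk s) : Int :=
  match starts with
  | [] => energy
  | s :: rest =>
    loopStarts d rest (max energy (traverseA d s (h s List.mem_cons_self)))
      (fun x hx => h x (List.mem_cons_of_mem _ hx))

theorem pvStartsDirOk (minY maxY minX maxX : Int) (s : PvSt)
    (hs : s ∈ (PySem.List.pyRange 0 (maxX + 11) 1).foldl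
        (fun acc c => acc ++ [(minY, c, 1, 0), (maxY, c, -1, 0)])
        ((PySem.List.pyRange 0 (maxY + 1) 1).foldl
          (fun acc r => acc ++ [(r, minX, 0, 1), (r, maxX, 0, -1)]) [])) : PvDirOk s := by
  rw [PySem.List.foldl_append_eq_flatMap, PySem.List.foldl_append_eq_flatMap] at hs
  simp only [List.nil_append, List.mem_append, List.mem_flatMap, List.mem_cons,
    List.not_mem_nil, or_false] at hs
  rcases hs with ⟨r, _, rfl | rfl⟩ | ⟨c, _, rfl | rfl⟩ <;> simp [PvDirOk, pvD4]

def part2 (grid : List (List Int × String)) : Int :=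
  let d := PySem.Dict.ofList grid
  let maxY := (PySem.List.max? (d.keys.map (fun k => k.headD 0)) (fun y => y)).getD 0
  let maxX := (PySem.List.max? (d.keys.map (fun k => k.getD 1 0)) (fun x => x)).getD 0
  let minY := (PySem.List.min? (d.keys.map (fun k => k.headD 0)) (fun y => y)).getD 0
  let minX := (PySem.List.min? (d.keys.map (fun k => k.getD 1 0)) (fun x => x)).getD 0
  let start1 := (PySem.List.pyRange 0 (maxY + 1) 1).foldl
    (fun acc r => acc ++ [(r, minX, 0, 1), (r, maxX, 0, -1)]) []
  let starts := (PySem.List.pyRange 0 (maxX + 11) 1).foldl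
    (fun acc c => acc ++ [(minY, c, 1, 0), (maxY, c, -1, 0)]) start1
  loopStarts d starts 0 (fun s hs => pvStartsDirOk minY maxY minX maxX s hs)

-- ===== PORT B =====

-- the candidate comprehension {p for s in seen for p in get_next(s, grid) if p[:2] in grid}
def pvCand (d : PySem.Dict (List Int) String) (seen : List PvSt) : List PvSt :=
  seen.flatMap (fun s => (getNext d s).filter (fun p => PySem.Dict.contains d [p.1, p.2.1]))

-- one round of B's for-loop; the Bool is the break flag
def stepB (d : PySem.Dict (List Int) String) (st : List PvSt × Bool) : List PvSt × Bool :=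
  if st.2 then st
  else
    let grown := PySem.Set.union st.1 (PySem.Set.ofList (pvCand d st.1))
    if grown.length = st.1.length then (st.1, true) else (grown, false)

-- B's traverse: saturate the seen set round by round until the first fixpoint
def traverseB (d : PySem.Dict (List Int) String) (start : PvSt) : Int :=
  if PySem.Dict.contains d [start.1, start.2.1] = true then
    let res := (PySem.List.pyRange 0 (4 * (d.size : Int)) 1).foldl
      (fun st _ => stepB d st) (PySem.Set.ofList [start], false)
    ((PySem.Set.ofList (res.1.map (fun x => (x.1, x.2.1)))).length : Int)
  else 0

def part2_alt (grid : List (List Int × String)) : Int :=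
  let d := PySem.Dict.ofList grid
  let ys := d.keys.map (fun k => k.headD 0)
  let xs := d.keys.map (fun k => k.getD 1 0)
  let maxY := (PySem.List.max? ys (fun y => y)).getD 0
  let minY := (PySem.List.min? ys (fun y => y)).getD 0
  let maxX := (PySem.List.max? xs (fun x => x)).getD 0
  let minX := (PySem.List.min? xs (fun x => x)).getD 0
  let starts := (PySem.List.pyRange 0 (maxY + 1) 1).flatMap
      (fun r => [(r, minX, 0, 1), (r, maxX, 0, -1)]) ++
    (PySem.List.pyRange 0 (maxX + 11) 1).flatMap
      (fun c => [(minY, c, 1, 0), (maxY, c, -1, 0)])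
  starts.foldl (fun e s => max e (traverseB d s)) 0

-- ===== PRECONDITION & SPEC =====
-- Pre_ excludes exactly the inputs where the Python A raises ValueError: an empty grid
-- (max()/min() of an empty sequence) or a key that is not a length-2 coordinate pair
-- (tuple unpacking 'for y, x in grid.keys()' fails).
def Pre_part2 (grid : List (List Int × String)) : Prop :=
  grid ≠ [] ∧ ∀ p ∈ grid, p.1.length = 2
instance (grid : List (List Int × String)) : Decidable (Pre_part2 grid) := by
  unfold Pre_part2; infer_instance

def pvWitness_part2 : (List (List Int × String)) := [([0, 0], ".")]

def Spec_part2 (grid : List (List Int × String)) (out : Int) : Prop := out = part2_alt grid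
instance (grid : List (List Int × String)) (out : Int) : Decidable (Spec_part2 grid out) := by
  unfold Spec_part2; infer_instance

-- ===== CLAIM (what is proved, stated in full; the proofs are below) =====
def Claim_equal_part2 : Prop := ∀ (grid : List (List Int × String)),
  Dom_part2 grid → Pre_part2 grid → Spec_part2 grid (part2 grid)

-- ===== LEMMAS AND PROOFS =====

-- x is an in-grid state
def PvInG (d : PySem.Dict (List Int) String) (x : PvSt) : Prop :=
  PySem.Dict.contains d [x.1, x.2.1] = true

-- the beam states both traversals are meant to collect
inductive PvReach (d : PySem.Dict (List Int) String) (start : PvSt) : PvSt → Prop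
  | base : PvInG d start → PvReach d start start
  | step {u v : PvSt} : PvReach d start u → v ∈ getNext d u → PvInG d v → PvReach d start v

def PvClosed (d : PySem.Dict (List Int) String) (l : List PvSt) : Prop :=
  ∀ u ∈ l, ∀ v ∈ getNext d u, PvInG d v → v ∈ l

theorem bfsAux_subset (d : PySem.Dict (List Int) String) (seen queue : List PvSt)
    (hq : ∀ x ∈ queue, PvDirOk x) : seen ⊆ bfsAux d seen queue hq := by
  fun_induction bfsAux d seen queue hq with
  | case1 seen hq1 hq2 => exact fun x hx => hx
  | case2 seen s tail hq1 hin hq2 ih =>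
    exact fun x hx => ih ((PySem.Set.mem_add seen s x).mpr (Or.inl hx))
  | case3 seen s tail hq1 hin hq2 ih => exact ih

theorem bfsAux_sound (d : PySem.Dict (List Int) String) (R : PvSt → Prop)
    (hR : ∀ u v, R u → v ∈ getNext d u → PvInG d v → R v)
    (seen queue : List PvSt) (hq : ∀ x ∈ queue, PvDirOk x) :
    (∀ x ∈ seen, R x) → (∀ x ∈ queue, PvInG d x → R x) →
    ∀ x ∈ bfsAux d seen queue hq, R x := by
  fun_induction bfsAux d seen queue hq with
  | case1 seen hq1 hq2 => exact fun hseen _ => hseen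
  | case2 seen s tail hq1 hin hq2 ih =>
    intro hseen hqueue
    apply ih
    · intro x hx
      rcases (PySem.Set.mem_add seen s x).mp hx with h | rfl
      · exact hseen x h
      · exact hqueue x List.mem_cons_self hin
    · intro x hx hg
      rcases List.mem_append.mp hx with h | h
      · exact hqueue x (List.mem_cons_of_mem _ h) hg
      · exact hR s x (hqueue s List.mem_cons_self hin) (List.mem_of_mem_filter h) hg
  | case3 seen s tail hq1 hin hq2 ih =>
    intro hseen hqueue
    exact ih hseen (fun x hx hg => hqueue x (List.mem_cons_of_mem _ hx) hg)

theorem bfsAux_mem_queue (d : PySem.Dict (List Int) String) (seen queue : List PvSt)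
    (hq : ∀ x ∈ queue, PvDirOk x) :
    ∀ x ∈ queue, PvInG d x → x ∈ bfsAux d seen queue hq := by
  fun_induction bfsAux d seen queue hq with
  | case1 seen hq1 hq2 => exact fun x hx _ => absurd hx (List.not_mem_nil)
  | case2 seen s tail hq1 hin hq2 ih =>
    intro x hx hg
    rcases List.mem_cons.mp hx with rfl | h
    · exact bfsAux_subset _ _ _ _ ((PySem.Set.mem_add seen x x).mpr (Or.inr rfl))
    · exact ih x (List.mem_append.mpr (Or.inl h)) hg
  | case3 seen s tail hq1 hin hq2 ih =>
    intro x hx hg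
    rcases List.mem_cons.mp hx with rfl | h
    · exact absurd hg hin
    · exact ih x h hg

theorem bfsAux_closed (d : PySem.Dict (List Int) String) (seen queue : List PvSt)
    (hq : ∀ x ∈ queue, PvDirOk x) :
    (∀ u ∈ seen, ∀ v ∈ getNext d u, PvInG d v → v ∈ seen ∨ v ∈ queue) →
    PvClosed d (bfsAux d seen queue hq) := by
  fun_induction bfsAux d seen queue hq with
  | case1 seen hq1 hq2 =>
    intro hinv u hu v hv hg
    rcases hinv u hu v hv hg with h | h
    · exact h
    · exact absurd h (List.not_mem_nil)
  | case2 seen s tail hq1 hin hq2 ih =>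
    intro hinv
    apply ih
    intro u hu v hv hg
    rcases (PySem.Set.mem_add seen s u).mp hu with hu' | rfl
    · rcases hinv u hu' v hv hg with h | h
      · exact Or.inl ((PySem.Set.mem_add seen s v).mpr (Or.inl h))
      · rcases List.mem_cons.mp h with rfl | h
        · exact Or.inl ((PySem.Set.mem_add seen v v).mpr (Or.inr rfl))
        · exact Or.inr (List.mem_append.mpr (Or.inl h))
    · by_cases hvs : v ∈ PySem.Set.add seen u
      · exact Or.inl hvs
      · refine Or.inr (List.mem_append.mpr (Or.inr ?_))
        rw [List.mem_filter]
        exact ⟨hv, by simp [hvs]⟩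
  | case3 seen s tail hq1 hin hq2 ih =>
    intro hinv
    apply ih
    intro u hu v hv hg
    rcases hinv u hu v hv hg with h | h
    · exact Or.inl h
    · rcases List.mem_cons.mp h with rfl | h
      · exact absurd hg hin
      · exact Or.inr h

theorem bfsA_iff_reach (d : PySem.Dict (List Int) String) (start : PvSt)
    (hq : ∀ x ∈ [start], PvDirOk x) (x : PvSt) :
    x ∈ bfsAux d [] [start] hq ↔ PvReach d start x := by
  constructor
  · apply bfsAux_sound d (PvReach d start)
      (fun u v hu hv hg => PvReach.step hu hv hg) [] [start] hq
    · intro x hx; exact absurd hx (List.not_mem_nil)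
    · intro x hx hg
      rw [List.mem_singleton] at hx
      subst hx
      exact PvReach.base hg
  · intro hr
    induction hr with
    | base hg => exact bfsAux_mem_queue d [] [start] hq start List.mem_cons_self hg
    | step hu hv hg ihm =>
      exact bfsAux_closed d [] [start] hq
        (fun u hu' => absurd hu' (List.not_mem_nil)) _ ihm _ hv hg

theorem pv_fst_mk (l : List PvSt) (b : Bool) : (l, b).1 = l := rfl

theorem pv_mem_cand (d : PySem.Dict (List Int) String) (seen : List PvSt) (x : PvSt) :
    x ∈ pvCand d seen ↔ (∃ u ∈ seen, x ∈ getNext d u) ∧ PvInG d x := by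
  simp only [pvCand, List.mem_flatMap, List.mem_filter, PvInG]
  tauto

theorem pv_foldl_const {α β : Type} (l : List α) (f : β → β) (init : β) :
    l.foldl (fun s _ => f s) init = f^[l.length] init := by
  induction l generalizing init with
  | nil => rfl
  | cons a t ih => simp [List.foldl_cons, ih, Function.iterate_succ_apply]

theorem stepB_of_flag (d : PySem.Dict (List Int) String) (st : List PvSt × Bool)
    (h : st.2 = true) : stepB d st = st := by
  simp [stepB, h]

theorem pvUniv_dirOk (d : PySem.Dict (List Int) String) (x : PvSt) (h : x ∈ pvUniv d) :
    PvDirOk x := by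
  rcases List.mem_flatMap.mp h with ⟨k, _, hk⟩
  unfold pvKeyStates at hk
  match k with
  | [] => exact absurd hk (List.not_mem_nil)
  | [r] => exact absurd hk (List.not_mem_nil)
  | r :: c :: z :: t => exact absurd hk (List.not_mem_nil)
  | [r, c] =>
    rcases List.mem_map.mp hk with ⟨p, hp, rfl⟩
    exact hp

theorem iterB_sound (d : PySem.Dict (List Int) String) (start : PvSt) (hin : PvInG d start)
    (n : Nat) : ∀ x ∈ ((stepB d)^[n] ([start], false)).1, PvReach d start x := by
  induction n with
  | zero =>
    intro x hx
    simp only [Function.iterate_zero_apply] at hx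
    rw [List.mem_singleton] at hx
    subst hx
    exact PvReach.base hin
  | succ n ih =>
    rw [Function.iterate_succ_apply']
    intro x hx
    by_cases hf : ((stepB d)^[n] ([start], false)).2 = true
    · rw [stepB_of_flag d _ hf] at hx
      exact ih x hx
    · simp only [stepB, hf, if_false, Bool.false_eq_true] at hx
      split at hx
      · exact ih x hx
      · rcases (PySem.Set.mem_union _ _ x).mp hx with h | h
        · exact ih x h
        · rw [PySem.Set.mem_ofList] at h
          rcases (pv_mem_cand d _ x).mp h with ⟨⟨u, hu, hx'⟩, hg⟩
          exact PvReach.step (ih u hu) hx' hg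

theorem iterB_inv (d : PySem.Dict (List Int) String) (start : PvSt) (hin : PvInG d start)
    (hd : PvDirOk start) (n : Nat) :
    ((stepB d)^[n] ([start], false)).1.Nodup ∧
    (∀ x ∈ ((stepB d)^[n] ([start], false)).1, x ∈ pvUniv d) ∧
    start ∈ ((stepB d)^[n] ([start], false)).1 := by
  induction n with
  | zero =>
    simp only [Function.iterate_zero_apply]
    refine ⟨List.nodup_singleton _, ?_, List.mem_cons_self⟩
    intro x hx
    rw [List.mem_singleton] at hx
    rw [hx]
    exact pv_mem_univ d start hin hd
  | succ n ih =>
    obtain ⟨hnd, hu, hst⟩ := ih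
    rw [Function.iterate_succ_apply']
    by_cases hf : ((stepB d)^[n] ([start], false)).2 = true
    · rw [stepB_of_flag d _ hf]
      exact ⟨hnd, hu, hst⟩
    · simp only [stepB, hf, if_false, Bool.false_eq_true]
      split
      · exact ⟨hnd, hu, hst⟩
      · refine ⟨PySem.Set.nodup_update _ _ hnd, ?_, (PySem.Set.mem_union _ _ _).mpr (Or.inl hst)⟩
        intro x hx
        rcases (PySem.Set.mem_union _ _ x).mp hx with h | h
        · exact hu x h
        · rw [PySem.Set.mem_ofList] at h
          rcases (pv_mem_cand d _ x).mp h with ⟨⟨u, hu', hx'⟩, hg⟩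
          exact pv_mem_univ d x hg (dirOk_getNext d u (pvUniv_dirOk d u (hu u hu')) x hx')

theorem iterB_growth (d : PySem.Dict (List Int) String) (start : PvSt) (n : Nat)
    (h : ((stepB d)^[n] ([start], false)).2 = false) :
    n + 1 ≤ ((stepB d)^[n] ([start], false)).1.length := by
  induction n with
  | zero => simp [Function.iterate_zero_apply]
  | succ n ih =>
    rw [Function.iterate_succ_apply'] at h ⊢
    by_cases hf : ((stepB d)^[n] ([start], false)).2 = true
    · rw [stepB_of_flag d _ hf] at h
      exact absurd hf (by simp [h])
    · have hlen := ih (by revert hf; cases ((stepB d)^[n] ([start], false)).2 <;> simp)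
      simp only [stepB, hf, if_false, Bool.false_eq_true] at h ⊢
      split at h
      · exact absurd h (by simp)
      · rename_i hne
        rw [if_neg hne, pv_fst_mk]
        have heq : (PySem.Set.union ((stepB d)^[n] ([start], false)).1
            (PySem.Set.ofList (pvCand d ((stepB d)^[n] ([start], false)).1))).length =
            ((stepB d)^[n] ([start], false)).1.length +
            ((PySem.Set.ofList (pvCand d ((stepB d)^[n] ([start], false)).1)).filter
              (fun y => !(PySem.Set.contains ((stepB d)^[n] ([start], false)).1 y))).length := by
          rw [PySem.Set.union, PySem.Set.update_eq_append_filter, PySem.Set.ofList_ofList,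
            List.length_append]
        omega

theorem iterB_closed (d : PySem.Dict (List Int) String) (start : PvSt) (n : Nat)
    (h : ((stepB d)^[n] ([start], false)).2 = true) :
    PvClosed d ((stepB d)^[n] ([start], false)).1 := by
  induction n with
  | zero => exact absurd h (by simp)
  | succ n ih =>
    rw [Function.iterate_succ_apply'] at h ⊢
    by_cases hf : ((stepB d)^[n] ([start], false)).2 = true
    · rw [stepB_of_flag d _ hf] at h ⊢
      exact ih h
    · simp only [stepB, hf, if_false, Bool.false_eq_true] at h ⊢
      split at h <;> rename_i hlen
      · rw [if_pos hlen]
        have hfil : ((PySem.Set.ofList (pvCand d ((stepB d)^[n] ([start], false)).1)).filter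
            (fun y => !(PySem.Set.contains ((stepB d)^[n] ([start], false)).1 y))) = [] := by
          have : (PySem.Set.union ((stepB d)^[n] ([start], false)).1
              (PySem.Set.ofList (pvCand d ((stepB d)^[n] ([start], false)).1))).length =
              ((stepB d)^[n] ([start], false)).1.length +
              ((PySem.Set.ofList (pvCand d ((stepB d)^[n] ([start], false)).1)).filter
                (fun y => !(PySem.Set.contains ((stepB d)^[n] ([start], false)).1 y))).length := by
            rw [PySem.Set.union, PySem.Set.update_eq_append_filter, PySem.Set.ofList_ofList,
              List.length_append]
          rw [this] at hlen
          have : ((PySem.Set.ofList (pvCand d ((stepB d)^[n] ([start], false)).1)).filter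
              (fun y => !(PySem.Set.contains ((stepB d)^[n] ([start], false)).1 y))).length = 0 := by
            omega
          exact List.length_eq_zero_iff.mp this
        intro u hu v hv hg
        have hvc : v ∈ PySem.Set.ofList (pvCand d ((stepB d)^[n] ([start], false)).1) := by
          rw [PySem.Set.mem_ofList]
          exact (pv_mem_cand d _ v).mpr ⟨⟨u, hu, hv⟩, hg⟩
        by_contra hns
        have : v ∈ ((PySem.Set.ofList (pvCand d ((stepB d)^[n] ([start], false)).1)).filter
            (fun y => !(PySem.Set.contains ((stepB d)^[n] ([start], false)).1 y))) := by
          rw [List.mem_filter]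
          exact ⟨hvc, by simp [hns]⟩
        rw [hfil] at this
        exact absurd this (List.not_mem_nil)
      · exact absurd h (by simp)

theorem pvUniv_length (d : PySem.Dict (List Int) String) :
    (pvUniv d).length ≤ 4 * d.size := by
  unfold pvUniv
  rw [List.length_flatMap]
  have h1 : ∀ y ∈ d.keys.map (fun k => (pvKeyStates k).length), y ≤ 4 := by
    intro y hy
    rcases List.mem_map.mp hy with ⟨k, _, rfl⟩
    unfold pvKeyStates
    match k with
    | [] => simp
    | [r] => simp
    | [r, c] => simp [pvD4]
    | r :: c :: z :: t => simp
  have h2 := List.sum_le_card_nsmul _ 4 h1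
  simp only [List.length_map, smul_eq_mul] at h2
  have h3 : d.keys.length = d.size := by
    simp [PySem.Dict.keys, PySem.Dict.size]
  omega

theorem iterB_final_flag (d : PySem.Dict (List Int) String) (start : PvSt)
    (hin : PvInG d start) (hd : PvDirOk start) :
    ((stepB d)^[4 * d.size] ([start], false)).2 = true := by
  by_contra h
  have hf : ((stepB d)^[4 * d.size] ([start], false)).2 = false := by
    revert h; cases ((stepB d)^[4 * d.size] ([start], false)).2 <;> simp
  have hg := iterB_growth d start _ hf
  obtain ⟨hnd, hu, _⟩ := iterB_inv d start hin hd (4 * d.size)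
  have hle : ((stepB d)^[4 * d.size] ([start], false)).1.length ≤ (pvUniv d).length :=
    (List.subperm_of_subset hnd (fun x hx => hu x hx)).length_le
  have := pvUniv_length d
  omega

theorem iterB_iff_reach (d : PySem.Dict (List Int) String) (start : PvSt)
    (hin : PvInG d start) (hd : PvDirOk start) (x : PvSt) :
    x ∈ ((stepB d)^[4 * d.size] ([start], false)).1 ↔ PvReach d start x := by
  constructor
  · exact iterB_sound d start hin _ x
  · intro hr
    induction hr with
    | base hg => exact (iterB_inv d start hin hd _).2.2
    | step hu hv hg ihm =>
      exact iterB_closed d start _ (iterB_final_flag d start hin hd) _ ihm _ hv hg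

theorem pv_count_eq (l1 l2 : List PvSt) (h : ∀ x, x ∈ l1 ↔ x ∈ l2) :
    ((PySem.Set.ofList (l1.map (fun x => (x.1, x.2.1)))).length : Int) =
    ((PySem.Set.ofList (l2.map (fun x => (x.1, x.2.1)))).length : Int) := by
  have h1 : ∀ y, y ∈ PySem.Set.ofList (l1.map (fun x => (x.1, x.2.1))) ↔
      y ∈ PySem.Set.ofList (l2.map (fun x => (x.1, x.2.1))) := by
    intro y
    rw [PySem.Set.mem_ofList, PySem.Set.mem_ofList, List.mem_map, List.mem_map]
    constructor
    · rintro ⟨a, ha, rfl⟩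
      exact ⟨a, (h a).mp ha, rfl⟩
    · rintro ⟨a, ha, rfl⟩
      exact ⟨a, (h a).mpr ha, rfl⟩
  have hp := (List.perm_ext_iff_of_nodup (PySem.Set.nodup_ofList _)
    (PySem.Set.nodup_ofList _)).mpr h1
  exact_mod_cast hp.length_eq

theorem traverse_eq (d : PySem.Dict (List Int) String) (start : PvSt) (h : PvDirOk start) :
    traverseA d start h = traverseB d start := by
  unfold traverseA traverseB
  by_cases hin : PySem.Dict.contains d [start.1, start.2.1] = true
  · rw [if_pos hin]
    rw [pv_foldl_const]
    have hlen : (PySem.List.pyRange 0 (4 * (d.size : Int)) 1).length = 4 * d.size := by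
      rw [PySem.List.length_pyRange_one]
      omega
    rw [hlen]
    have hofl : PySem.Set.ofList [start] = [start] := rfl
    rw [hofl]
    apply pv_count_eq
    intro x
    rw [bfsA_iff_reach d start _ x, iterB_iff_reach d start hin h x]
  · rw [if_neg hin]
    rw [bfsAux]
    simp only [hin]
    rw [bfsAux]
    simp

theorem loop_eq (d : PySem.Dict (List Int) String) (starts : List PvSt) :
    ∀ (energy : Int) (h : ∀ s ∈ starts, PvDirOk s),
    loopStarts d starts energy h = starts.foldl (fun e s => max e (traverseB d s)) energy := by
  induction starts with
  | nil => intro energy h; rfl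
  | cons s rest ih =>
    intro energy h
    rw [loopStarts, List.foldl_cons, traverse_eq]
    exact ih _ _

-- ===== VERDICT (by name: the statement is the Claim_ definition above) =====
theorem part2_spec : Claim_equal_part2 := by
  intro grid _ _
  unfold Spec_part2 part2 part2_alt
  rw [loop_eq]
  rw [PySem.List.foldl_append_eq_flatMap, PySem.List.foldl_append_eq_flatMap]
  simp [List.nil_append]
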